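-- pv_equiv track=rewrite | github.com/changshengEVA/M-Agent | src/m_agent/load_data/dialog_history_loader.py | parse_history_string
-- ===== SOURCE A (Python) =====
-- from typing import List, Dict, Any, Optional
--
-- def parse_history_string(history_str: str) -> List[Dict[str, str]]:
--     """
--     解析历史字符串格式为结构化的 turns
--     """
--     turns = []
--     lines = history_str.strip().split('\n')
--
--     for line in lines:
--         line = line.strip()
--         if not line:
--             continue
--
--         if ':' in line:
--             speaker, text = line.split(':', 1)
--             speaker = speaker.strip()
--             text = text.strip()
--
--             if speaker.startswith('changshengEVA'):
--                 speaker = 'changshengEVA'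
--             elif speaker.startswith('ZQR'):
--                 speaker = 'ZQR'
--
--             turns.append({'speaker': speaker, 'text': text})
--         else:
--             if turns:
--                 turns[-1]['text'] += '\n' + line
--
--     return turns
-- ===== SOURCE B (Python) =====
-- def parse_history_string(history_str):
--     """Two stages: normalize once to a list of stripped non-blank lines (dropping
--     leading continuation lines), then recursive descent: each step consumes one
--     header line plus its run of continuation lines and emits the turn with a
--     single join."""
--     lines = [s for s in (raw.strip() for raw in history_str.strip().split('\n')) if s]
--     while lines and ':' not in lines[0]:
--         lines.pop(0)
--
--     def build(ls):
--         if not ls: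
--             return []
--         speaker, text = ls[0].split(':', 1)
--         speaker = speaker.strip()
--         if speaker.startswith('changshengEVA'):
--             speaker = 'changshengEVA'
--         elif speaker.startswith('ZQR'):
--             speaker = 'ZQR'
--         k = 1
--         while k < len(ls) and ':' not in ls[k]:
--             k += 1
--         return [{'speaker': speaker,
--                  'text': '\n'.join([text.strip()] + ls[1:k])}] + build(ls[k:])
--
--     return build(lines)
-- ===== Notes on version B (the rewrite author's own statement) =====
-- stated objective: alternative
-- what changed: Replaces A's single streaming fold that mutates the last emitted turn's text on every continuation line with a two-stage decomposition: one pass normalizes to stripped non-blank lines (dropping leading continuations), then a recursive descent consumes one header line plus its run of continuation lines per step, building each turn's text with a single join.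
import Mathlib
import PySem

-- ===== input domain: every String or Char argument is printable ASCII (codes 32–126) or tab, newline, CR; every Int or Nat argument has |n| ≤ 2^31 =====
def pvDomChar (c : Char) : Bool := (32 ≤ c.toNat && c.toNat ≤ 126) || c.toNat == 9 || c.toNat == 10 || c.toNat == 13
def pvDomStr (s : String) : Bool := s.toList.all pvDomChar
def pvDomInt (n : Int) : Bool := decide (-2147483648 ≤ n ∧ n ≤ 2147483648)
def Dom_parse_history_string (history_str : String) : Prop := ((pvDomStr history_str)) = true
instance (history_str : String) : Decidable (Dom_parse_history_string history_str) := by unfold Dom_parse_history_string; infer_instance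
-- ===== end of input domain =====

-- B replaces A's single streaming fold (which mutates the last emitted turn's text
-- on each continuation line) by two stages: normalize to stripped non-blank lines,
-- then recursive descent consuming one header line plus its continuation run per
-- step (text built by one join); same cost, alternative decomposition.

-- ===== PORT A =====
-- loop body of A's `for line in lines` (turn dicts are assoc lists [("speaker",_),("text",_)];
-- `turns[-1]['text'] += …` is ported as updating the value at the (unique) key "text" — exact,
-- since every turn dict has exactly the keys "speaker","text")
def pvStepA (turns : List (List (String × String))) (raw : String) :
    List (List (String × String)) :=
  let line := PySem.Str.strip raw
  if line == "" then turns
  else if PySem.Str.isIn ":" line then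
    match PySem.Str.splitMax? line ":" 1 with
    | some (speaker :: text :: _) =>
        let speaker := PySem.Str.strip speaker
        let text := PySem.Str.strip text
        let speaker :=
          if PySem.Str.startswith speaker "changshengEVA" then "changshengEVA"
          else if PySem.Str.startswith speaker "ZQR" then "ZQR" else speaker
        turns ++ [[("speaker", speaker), ("text", text)]]
    | _ => turns  -- unreachable: ':' in line guarantees split(':',1) has two parts
  else
    match turns.getLast? with
    | some last =>
        turns.dropLast ++
          [last.map (fun p => if p.1 == "text" then (p.1, p.2 ++ ("\n" ++ line)) else p)]
    | none => turns  -- `if turns:` guard: leading continuation lines are dropped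

def parse_history_string (history_str : String) : List (List (String × String)) :=
  ((PySem.Str.split? (PySem.Str.strip history_str) "\n").getD []).foldl pvStepA []

-- ===== PORT B =====
-- `':' not in line`, B's continuation-line test
def pvNoColon (s : String) : Bool := !(PySem.Str.isIn ":" s)

-- B's inner `build`: consume the header line plus its run of continuation lines, recurse
def pvBuild : List String → List (List (String × String))
  | [] => []
  | l :: rest =>
    match PySem.Str.splitMax? l ":" 1 with
    | some (speaker :: text :: _) =>
        let speaker := PySem.Str.strip speaker
        let speaker :=
          if PySem.Str.startswith speaker "changshengEVA" then "changshengEVA"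
          else if PySem.Str.startswith speaker "ZQR" then "ZQR" else speaker
        [("speaker", speaker),
         ("text", PySem.Str.join "\n" (PySem.Str.strip text :: rest.takeWhile pvNoColon))] ::
          pvBuild (rest.dropWhile pvNoColon)
    | _ => []  -- unreachable: every list passed to pvBuild starts with a ':'-line
termination_by ls => ls.length
decreasing_by
  simp only [List.length_cons]
  exact Nat.lt_succ_of_le (List.length_dropWhile_le _ _)

def parse_history_string_alt (history_str : String) : List (List (String × String)) :=
  let lines :=
    (((PySem.Str.split? (PySem.Str.strip history_str) "\n").getD []).map
      PySem.Str.strip).filter (fun s => !(s == ""))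
  pvBuild (lines.dropWhile pvNoColon)

-- ===== PRECONDITION & SPEC =====
def Spec_parse_history_string (history_str : String) (out : List (List (String × String))) : Prop := out = parse_history_string_alt history_str
instance (history_str : String) (out : List (List (String × String))) : Decidable (Spec_parse_history_string history_str out) := by unfold Spec_parse_history_string; infer_instance

-- ===== CLAIM (what is proved, stated in full; the proofs are below) =====
def Claim_equal_parse_history_string : Prop := ∀ (history_str : String), Dom_parse_history_string history_str → Spec_parse_history_string history_str (parse_history_string history_str)

-- ===== LEMMAS AND PROOFS =====

-- `s.split(':', 1)` has exactly two parts when ':' occurs in s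
theorem pvGo0 (fuel : Nat) (l cur : List Char) (acc : List (List Char)) :
    PySem.Chars.splitOnMax.go [':'] fuel 0 l cur acc = ((cur.reverse ++ l) :: acc).reverse := by
  cases fuel <;> cases l <;> simp [PySem.Chars.splitOnMax.go]

theorem pvGo1 (fuel : Nat) : ∀ (l cur : List Char) (acc : List (List Char)),
    l.length ≤ fuel → ':' ∈ l →
    ∃ a b, PySem.Chars.splitOnMax.go [':'] fuel 1 l cur acc = acc.reverse ++ [a, b] := by
  induction fuel with
  | zero =>
    intro l cur acc hlen hm
    have : l = [] := List.length_eq_zero_iff.mp (Nat.le_zero.mp hlen)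
    subst this; simp at hm
  | succ n ih =>
    intro l cur acc hlen hm
    cases l with
    | nil => simp at hm
    | cons c rest =>
      by_cases hc : c = ':'
      · subst hc
        refine ⟨cur.reverse, rest, ?_⟩
        simp [PySem.Chars.splitOnMax.go, List.isPrefixOf, pvGo0]
      · have hm' : ':' ∈ rest := by simpa [hc, eq_comm] using hm
        obtain ⟨a, b, hab⟩ := ih rest (c :: cur) acc (by simpa using Nat.le_of_succ_le_succ hlen) hm'
        refine ⟨a, b, ?_⟩
        have hne : ¬ (':' = c) := fun h => hc h.symm
        simpa [PySem.Chars.splitOnMax.go, List.isPrefixOf, beq_iff_eq, hne] using hab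

theorem pvSplitColon (s : String) (h : PySem.Str.isIn ":" s = true) :
    ∃ a b, PySem.Str.splitMax? s ":" 1 = some [a, b] := by
  have hmem : ':' ∈ s.toList := by
    have := (PySem.Str.isIn_iff_infix ":" s).mp h
    exact (List.singleton_infix_iff ':' s.toList).mp (by simpa using this)
  obtain ⟨a, b, hab⟩ := pvGo1 (s.length + 1) s.toList [] [] (by simp) hmem
  exact ⟨String.ofList a, String.ofList b,
    by simp [PySem.Str.splitMax?, PySem.Chars.splitMax?, PySem.Chars.splitOnMax, hab]⟩

-- speaker-prefix normalization (proof-side name for the if-chain both ports inline)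
def pvNorm (s : String) : String :=
  if PySem.Str.startswith s "changshengEVA" then "changshengEVA"
  else if PySem.Str.startswith s "ZQR" then "ZQR" else s

-- a turn dict
def pvTurn (sp t0 : String) : List (String × String) := [("speaker", sp), ("text", t0)]

-- A's loop body applied to an already-stripped line
def pvTurnStep (turns : List (List (String × String))) (line : String) :
    List (List (String × String)) :=
  if line == "" then turns
  else if PySem.Str.isIn ":" line then
    match PySem.Str.splitMax? line ":" 1 with
    | some (speaker :: text :: _) =>
        let speaker := PySem.Str.strip speaker
        let text := PySem.Str.strip text
        let speaker :=
          if PySem.Str.startswith speaker "changshengEVA" then "changshengEVA"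
          else if PySem.Str.startswith speaker "ZQR" then "ZQR" else speaker
        turns ++ [[("speaker", speaker), ("text", text)]]
    | _ => turns
  else
    match turns.getLast? with
    | some last =>
        turns.dropLast ++
          [last.map (fun p => if p.1 == "text" then (p.1, p.2 ++ ("\n" ++ line)) else p)]
    | none => turns

theorem pvTurnStep_blank (turns : List (List (String × String))) :
    pvTurnStep turns "" = turns := by simp [pvTurnStep]

-- blank lines may be dropped from the fold
theorem pvFoldl_filter (l : List String) : ∀ acc,
    l.foldl pvTurnStep acc = (l.filter (fun s => !(s == ""))).foldl pvTurnStep acc := by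
  induction l with
  | nil => intro acc; rfl
  | cons x xs ih =>
    intro acc
    by_cases hx : x = ""
    · subst hx; simpa [pvTurnStep_blank] using ih acc
    · simp [hx, ih]

theorem pvJoin_shift (t0 x : String) (xs : List String) :
    PySem.Str.join "\n" (t0 :: x :: xs) =
      PySem.Str.join "\n" ((t0 ++ ("\n" ++ x)) :: xs) := by
  cases xs <;>
    simp [PySem.Str.join, PySem.Chars.join_cons_cons, PySem.Chars.join_singleton]

theorem pvTurnStep_header (acc : List (List (String × String))) (l sp tx : String)
    (rest : List String)
    (hb : (l == "") = false)
    (hc : PySem.Str.isIn ":" l = true)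
    (hsp : PySem.Str.splitMax? l ":" 1 = some (sp :: tx :: rest)) :
    pvTurnStep acc l = acc ++ [pvTurn (pvNorm (PySem.Str.strip sp)) (PySem.Str.strip tx)] := by
  have hcC : PySem.Chars.isIn [':'] l.toList = true := by simpa using hc
  simp [pvTurnStep, hb, hcC, hsp, pvNorm, pvTurn]

theorem pvTurnStep_cont (done : List (List (String × String))) (sp t0 l : String)
    (hb : (l == "") = false)
    (hc : PySem.Str.isIn ":" l = false) :
    pvTurnStep (done ++ [pvTurn sp t0]) l = done ++ [pvTurn sp (t0 ++ ("\n" ++ l))] := by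
  have hcC : PySem.Chars.isIn [':'] l.toList = false := by simpa using hc
  simp [pvTurnStep, hb, hcC, pvTurn]

theorem pvTurnStep_cont_nil (l : String)
    (hb : (l == "") = false)
    (hc : PySem.Str.isIn ":" l = false) :
    pvTurnStep [] l = [] := by
  have hcC : PySem.Chars.isIn [':'] l.toList = false := by simpa using hc
  simp [pvTurnStep, hb, hcC]

-- pvBuild at a header line whose split is known
theorem pvBuild_cons (l sp tx : String) (rest : List String) (ls : List String)
    (hsp : PySem.Str.splitMax? l ":" 1 = some (sp :: tx :: rest)) :
    pvBuild (l :: ls) =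
      pvTurn (pvNorm (PySem.Str.strip sp))
        (PySem.Str.join "\n" (PySem.Str.strip tx :: ls.takeWhile pvNoColon)) ::
      pvBuild (ls.dropWhile pvNoColon) := by
  rw [pvBuild, hsp]
  simp [pvNorm, pvTurn]

-- the main invariant: A's fold over stripped non-blank lines equals B's descent
theorem pvMain (ls : List String) (hnb : ∀ x ∈ ls, (x == "") = false) :
    (∀ done sp t0, ls.foldl pvTurnStep (done ++ [pvTurn sp t0]) =
        done ++ pvTurn sp (PySem.Str.join "\n" (t0 :: ls.takeWhile pvNoColon)) ::
          pvBuild (ls.dropWhile pvNoColon))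
    ∧ ls.foldl pvTurnStep [] = pvBuild (ls.dropWhile pvNoColon) := by
  induction ls with
  | nil =>
    constructor
    · intro done sp t0
      simp [pvBuild, PySem.Str.join, PySem.Chars.join_singleton, pvTurn]
    · simp [pvBuild]
  | cons l ls ih =>
    have hl : (l == "") = false := hnb l (List.mem_cons_self)
    obtain ⟨ihne, ihe⟩ := ih (fun x hx => hnb x (List.mem_cons_of_mem _ hx))
    by_cases hc : PySem.Str.isIn ":" l = true
    · obtain ⟨sp', tx, hsp⟩ := pvSplitColon l hc
      have hcC : PySem.Chars.isIn [':'] l.toList = true := by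
        simp only [PySem.Str.isIn_eq] at hc; exact hc
      have hncl : pvNoColon l = false := by simp [pvNoColon, hcC]
      constructor
      · intro done sp t0
        rw [List.foldl_cons, pvTurnStep_header _ l sp' tx [] hl hc hsp]
        rw [ihne (done ++ [pvTurn sp t0])]
        rw [List.takeWhile_cons_of_neg (by simp [hncl]),
          List.dropWhile_cons_of_neg (by simp [hncl]),
          pvBuild_cons l sp' tx [] ls hsp]
        simp [PySem.Str.join, PySem.Chars.join_singleton]
      · rw [List.foldl_cons, pvTurnStep_header _ l sp' tx [] hl hc hsp]
        rw [List.dropWhile_cons_of_neg (by simp [hncl]),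
          pvBuild_cons l sp' tx [] ls hsp]
        simpa using ihne []
          (pvNorm (PySem.Str.strip sp')) (PySem.Str.strip tx)
    · have hc' : PySem.Str.isIn ":" l = false := by simpa using hc
      have hcC : PySem.Chars.isIn [':'] l.toList = false := by
        simp only [PySem.Str.isIn_eq] at hc'; exact hc'
      have hncl : pvNoColon l = true := by simp [pvNoColon, hcC]
      constructor
      · intro done sp t0
        rw [List.foldl_cons, pvTurnStep_cont done sp t0 l hl hc',
          ihne done sp (t0 ++ ("\n" ++ l)),
          List.takeWhile_cons_of_pos hncl,
          List.dropWhile_cons_of_pos hncl,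
          pvJoin_shift]
      · rw [List.foldl_cons, pvTurnStep_cont_nil l hl hc',
          List.dropWhile_cons_of_pos hncl]
        exact ihe

theorem pvNonblank_filter (l : List String) :
    ∀ x ∈ (l.map PySem.Str.strip).filter (fun s => !(s == "")), (x == "") = false := by
  intro x hx
  have := (List.mem_filter.mp hx).2
  simpa using this

-- ===== VERDICT (by name: the statement is the Claim_ definition above) =====
theorem parse_history_string_spec : Claim_equal_parse_history_string := by
  intro h _
  unfold Spec_parse_history_string parse_history_string parse_history_string_alt
  have h1 : ∀ (raws : List String) (acc : List (List (String × String))),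
      raws.foldl pvStepA acc = (raws.map PySem.Str.strip).foldl pvTurnStep acc := by
    intro raws acc
    rw [List.foldl_map]
    rfl
  rw [h1]
  rw [pvFoldl_filter]
  exact (pvMain _ (pvNonblank_filter _)).2
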